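-- pv_equiv track=rewrite | github.com/zhonghe-ASP-2/feature_judge_template | code/feature_judge.py | timeseries_represent
-- ===== SOURCE A (Python) =====
-- window_size = 60
--
-- def sign(value, pre):
--     if value > 0:
--         return 1
--     elif value == 0:
--         return pre
--     else:
--         return 0
--
-- def sign1(value):
--     if value > 0:
--         return 1
--     elif value < 0:
--         return -1
--     else:
--         return 0
--
-- def timeseries_represent(timeseries):
--     diff1 = []
--     diff2 = []
--     for _, timeseries_value_ in enumerate(timeseries):
--         if _ == 0:
--             continue
--         diff2.append(sign1(timeseries[_] - timeseries[_ - 1]))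
--         pre = sum(diff2[max(0, _-window_size): _-1])
--         if pre > 0:
--             pre = 1
--         else:
--             pre = 0
--         diff1.append(sign(timeseries[_]-timeseries[_-1], pre))
--
--     return diff1
-- ===== SOURCE B (Python) =====
-- # B: two-pass re-implementation with a prefix-sum table replacing the repeated O(W) window sum.
-- window_size = 60
--
-- def sign(value, pre):
--     if value > 0:
--         return 1
--     elif value == 0:
--         return pre
--     else:
--         return 0
--
-- def sign1(value):
--     if value > 0:
--         return 1
--     elif value < 0:
--         return -1
--     else:
--         return 0
--
-- def timeseries_represent(timeseries):
--     n = len(timeseries)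
--     diff2 = [sign1(timeseries[i] - timeseries[i - 1]) for i in range(1, n)]
--     prefix = [0]
--     for d in diff2:
--         prefix.append(prefix[-1] + d)
--     diff1 = []
--     for i in range(1, n):
--         s = prefix[i - 1] - prefix[max(0, i - window_size)]
--         pre = 1 if s > 0 else 0
--         diff1.append(sign(timeseries[i] - timeseries[i - 1], pre))
--     return diff1
-- ===== Notes on version B (the rewrite author's own statement) =====
-- stated objective: faster
-- what changed: Replaces A's per-step O(window) slice-sum over the growing diff2 list with a one-pass prefix-sum table, turning the windowed adjustment into two prefix-table lookups per element in separate passes.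
import Mathlib
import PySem

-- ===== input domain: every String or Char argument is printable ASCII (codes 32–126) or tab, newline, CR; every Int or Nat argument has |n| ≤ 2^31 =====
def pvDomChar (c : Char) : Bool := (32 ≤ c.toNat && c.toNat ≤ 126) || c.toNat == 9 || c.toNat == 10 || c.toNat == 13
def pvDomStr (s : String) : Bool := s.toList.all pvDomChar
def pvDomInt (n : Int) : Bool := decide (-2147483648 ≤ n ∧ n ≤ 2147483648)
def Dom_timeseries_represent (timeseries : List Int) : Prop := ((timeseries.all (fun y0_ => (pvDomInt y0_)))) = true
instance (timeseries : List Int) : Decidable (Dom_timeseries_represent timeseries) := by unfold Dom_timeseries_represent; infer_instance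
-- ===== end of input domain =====

-- B replaces A's repeated O(window) inner slice-sum with a prefix-sum table built in one pass (objective: faster on long inputs).

-- ===== PORT A =====
def signA (value pre : Int) : Int :=
  if value > 0 then 1 else if value = 0 then pre else 0

def sign1A (value : Int) : Int :=
  if value > 0 then 1 else if value < 0 then -1 else 0

-- the body of A's for-loop over enumerate(timeseries), state = (diff1, diff2)
def stepA (timeseries : List Int) (st : List Int × List Int) (i : Int) : List Int × List Int :=
  if i = 0 then st
  else
    let d := PySem.List.pyGetD timeseries i 0 - PySem.List.pyGetD timeseries (i - 1) 0
    let diff2 := st.2 ++ [sign1A d]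
    let s := (PySem.List.slice diff2 (some (max 0 (i - 60))) (some (i - 1))).sum
    let pre : Int := if s > 0 then 1 else 0
    (st.1 ++ [signA d pre], diff2)

def timeseries_represent (timeseries : List Int) : List Int :=
  ((PySem.List.enumerate timeseries).foldl (fun st p => stepA timeseries st p.1) ([], [])).1

-- ===== PORT B =====
def signB (value pre : Int) : Int :=
  if value > 0 then 1 else if value = 0 then pre else 0

def sign1B (value : Int) : Int :=
  if value > 0 then 1 else if value < 0 then -1 else 0

def timeseries_represent_alt (timeseries : List Int) : List Int :=
  let n : Int := timeseries.length
  let diff2 := (PySem.List.pyRange 1 n).map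
    (fun i => sign1B (PySem.List.pyGetD timeseries i 0 - PySem.List.pyGetD timeseries (i - 1) 0))
  let pfx := diff2.foldl (fun acc d => acc ++ [PySem.List.pyGetD acc (-1) 0 + d]) [0]
  (PySem.List.pyRange 1 n).foldl
    (fun diff1 i =>
      let s := PySem.List.pyGetD pfx (i - 1) 0 - PySem.List.pyGetD pfx (max 0 (i - 60)) 0
      let pre : Int := if s > 0 then 1 else 0
      diff1 ++ [signB (PySem.List.pyGetD timeseries i 0 - PySem.List.pyGetD timeseries (i - 1) 0) pre])
    []

-- ===== PRECONDITION & SPEC =====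
def Spec_timeseries_represent (timeseries : List Int) (out : List Int) : Prop := out = timeseries_represent_alt timeseries
instance (timeseries : List Int) (out : List Int) : Decidable (Spec_timeseries_represent timeseries out) := by unfold Spec_timeseries_represent; infer_instance

-- ===== CLAIM (what is proved, stated in full; the proofs are below) =====
def Claim_equal_timeseries_represent : Prop := ∀ (timeseries : List Int), Dom_timeseries_represent timeseries → Spec_timeseries_represent timeseries (timeseries_represent timeseries)

-- ===== LEMMAS AND PROOFS =====

-- B's full diff2 list
def Dts (timeseries : List Int) : List Int :=
  (PySem.List.pyRange 1 (timeseries.length : Int)).map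
    (fun i => sign1B (PySem.List.pyGetD timeseries i 0 - PySem.List.pyGetD timeseries (i - 1) 0))

-- B's prefix-sum table
def Pts (timeseries : List Int) : List Int :=
  (Dts timeseries).foldl (fun acc d => acc ++ [PySem.List.pyGetD acc (-1) 0 + d]) [0]

-- B's per-index output value
def bodyB (timeseries : List Int) (i : Int) : Int :=
  let s := PySem.List.pyGetD (Pts timeseries) (i - 1) 0 - PySem.List.pyGetD (Pts timeseries) (max 0 (i - 60)) 0
  let pre : Int := if s > 0 then 1 else 0
  signB (PySem.List.pyGetD timeseries i 0 - PySem.List.pyGetD timeseries (i - 1) 0) pre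

theorem alt_eq_foldl_bodyB (timeseries : List Int) :
    timeseries_represent_alt timeseries =
      (PySem.List.pyRange 1 (timeseries.length : Int)).foldl
        (fun diff1 i => diff1 ++ [bodyB timeseries i]) [] := rfl

-- running prefix sums starting from accumulated value c
def psums (c : Int) : List Int → List Int
  | [] => []
  | d :: L => (c + d) :: psums (c + d) L


theorem pyGetD_neg_one_concat (acc : List Int) (x : Int) :
    PySem.List.pyGetD (acc ++ [x]) (-1) 0 = x := by
  simp [PySem.List.pyGetD, PySem.List.pyGet?, PySem.List.pyIdx?]

theorem prefix_fold_eq (L acc : List Int) (c : Int)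
    (h : PySem.List.pyGetD acc (-1) 0 = c) :
    L.foldl (fun acc d => acc ++ [PySem.List.pyGetD acc (-1) 0 + d]) acc = acc ++ psums c L := by
  induction L generalizing acc c with
  | nil => simp [psums]
  | cons d L ih =>
    simp only [List.foldl_cons, psums, h]
    rw [ih (acc ++ [c + d]) (c + d) (pyGetD_neg_one_concat _ _)]
    simp

theorem length_psums (c : Int) (L : List Int) : (psums c L).length = L.length := by
  induction L generalizing c with
  | nil => rfl
  | cons d L ih => simp [psums, ih]

theorem psums_getElem (c : Int) (L : List Int) (j : Nat) (hj : j < L.length) :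
    (psums c L)[j]'(by rw [length_psums]; exact hj) = c + (L.take (j + 1)).sum := by
  induction L generalizing c j with
  | nil => simp at hj
  | cons d L ih =>
    cases j with
    | zero => simp [psums]
    | succ m =>
      have hm : m < L.length := by simpa using hj
      simp [psums, ih (c + d) m hm]
      ring

theorem Pts_getD (timeseries : List Int) (j : Nat) (hj : j ≤ (Dts timeseries).length) :
    PySem.List.pyGetD (Pts timeseries) (j : Int) 0 = ((Dts timeseries).take j).sum := by
  have hPts : Pts timeseries = [0] ++ psums 0 (Dts timeseries) :=
    prefix_fold_eq _ _ _ (by rfl)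
  rw [hPts, PySem.List.pyGetD_natCast]
  cases j with
  | zero => simp
  | succ m =>
    have hm : m < (Dts timeseries).length := by omega
    have hlen : m < (psums 0 (Dts timeseries)).length := by rw [length_psums]; exact hm
    simp only [List.cons_append, List.nil_append, List.getD_cons_succ]
    rw [List.getD_eq_getElem _ _ hlen, psums_getElem 0 _ m hm]
    simp

theorem sum_window (L : List Int) (a b : Nat) (hab : a ≤ b) :
    (((L.drop a).take (b - a)).sum : Int) = (L.take b).sum - (L.take a).sum := by
  rw [show b = a + (b - a) from (Nat.add_sub_cancel' hab).symm]
  rw [List.take_add, List.sum_append]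
  simp

theorem length_Dts (timeseries : List Int) :
    (Dts timeseries).length = ((timeseries.length : Int) - 1).toNat := by
  simp [Dts, PySem.List.length_pyRange_one]

theorem Dts_getElem (timeseries : List Int) (j : Nat) (hj : j < (Dts timeseries).length) :
    (Dts timeseries)[j] =
      sign1B (PySem.List.pyGetD timeseries ((j : Int) + 1) 0 - PySem.List.pyGetD timeseries (j : Int) 0) := by
  simp [Dts, PySem.List.getElem_pyRange_one, add_comm]

theorem step_eq (ts : List Int) (k : Nat) (hk1 : 1 ≤ k) (hk : k < ts.length) (acc : List Int) :
    stepA ts (acc, (Dts ts).take (k - 1)) (k : Int) =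
      (acc ++ [bodyB ts (k : Int)], (Dts ts).take k) := by
  have hlen : (Dts ts).length = ts.length - 1 := by
    rw [length_Dts]; omega
  have hj : k - 1 < (Dts ts).length := by omega
  have hkne : ((k : Int)) ≠ 0 := by exact_mod_cast (by omega : 0 < k).ne'
  -- the appended element is the (k-1)-th entry of the full diff2 list
  have helem : sign1A (PySem.List.pyGetD ts (k : Int) 0 - PySem.List.pyGetD ts ((k : Int) - 1) 0)
      = (Dts ts)[k - 1]'hj := by
    rw [Dts_getElem ts (k - 1) hj]
    have h1 : ((k - 1 : Nat) : Int) + 1 = (k : Int) := by omega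
    have h2 : ((k - 1 : Nat) : Int) = (k : Int) - 1 := by omega
    rw [h1, h2]; rfl
  have htake : (Dts ts).take (k - 1) ++ [sign1A (PySem.List.pyGetD ts (k : Int) 0 - PySem.List.pyGetD ts ((k : Int) - 1) 0)]
      = (Dts ts).take k := by
    rw [helem, ← List.take_succ_eq_append_getElem hj]
    congr 1
    omega
  -- the window sums agree
  have ha : max 0 ((k : Int) - 60) = ((k - 60 : Nat) : Int) := by
    omega
  have hb : (k : Int) - 1 = ((k - 1 : Nat) : Int) := by omega
  have hsum : (PySem.List.slice ((Dts ts).take k) (some (max 0 ((k : Int) - 60))) (some ((k : Int) - 1))).sum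
      = PySem.List.pyGetD (Pts ts) ((k : Int) - 1) 0 - PySem.List.pyGetD (Pts ts) (max 0 ((k : Int) - 60)) 0 := by
    rw [ha, hb, Pts_getD ts (k - 1) (by omega), Pts_getD ts (k - 60) (by omega)]
    rw [PySem.List.slice_toNat _ (by positivity) (by positivity)]
    simp only [Int.toNat_natCast]
    rw [List.drop_take, List.take_take]
    rw [show min (k - 1 - (k - 60)) (k - (k - 60)) = k - 1 - (k - 60) by omega]
    exact sum_window (Dts ts) (k - 60) (k - 1) (by omega)
  simp only [stepA, bodyB, if_neg hkne, htake, hsum]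
  rfl

theorem loopA (timeseries : List Int) (k : Nat) (hk : k ≤ timeseries.length) :
    (PySem.List.pyRange 1 (k : Int)).foldl (stepA timeseries) ([], []) =
      ((PySem.List.pyRange 1 (k : Int)).foldl (fun diff1 i => diff1 ++ [bodyB timeseries i]) [],
       (Dts timeseries).take (k - 1)) := by
  induction k with
  | zero => simp [PySem.List.pyRange_one_eq_nil]
  | succ k ih =>
    rcases Nat.eq_zero_or_pos k with hk0 | hk1
    · subst hk0
      simp [PySem.List.pyRange_one_eq_nil]
    · have hkk : (1 : Int) ≤ (k : Int) := by exact_mod_cast hk1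
      have hcast : ((k + 1 : Nat) : Int) = (k : Int) + 1 := by push_cast; ring
      rw [hcast, PySem.List.pyRange_one_succ_right hkk, List.foldl_append, List.foldl_append,
        ih (by omega)]
      simp only [List.foldl_cons, List.foldl_nil]
      rw [step_eq timeseries k hk1 (by omega)]
      simp

-- ===== VERDICT (by name: the statement is the Claim_ definition above) =====
theorem timeseries_represent_spec : Claim_equal_timeseries_represent := by
  unfold Claim_equal_timeseries_represent
  intro ts _
  unfold Spec_timeseries_represent
  rw [alt_eq_foldl_bodyB]
  show ((PySem.List.enumerate ts).foldl (fun st p => stepA ts st p.1) ([], [])).1 = _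
  rw [← List.foldl_map, PySem.List.map_fst_enumerate]
  rcases Nat.eq_zero_or_pos ts.length with h0 | hpos
  · simp [h0, PySem.List.pyRange_one_eq_nil]
  · have hlt : (0 : Int) < (ts.length : Int) := by exact_mod_cast hpos
    rw [show (0 : Int) + (ts.length : Int) = (ts.length : Int) by ring,
      PySem.List.pyRange_one_cons hlt]
    simp only [List.foldl_cons]
    have h00 : stepA ts ([], []) 0 = ([], []) := by simp [stepA]
    rw [show (0 : Int) + 1 = 1 by ring, h00, loopA ts ts.length (le_refl _)]
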